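-- pv_equiv track=rewrite | github.com/pypi-data/pypi-mirror-378 | packages/validatelite/validatelite-0.5.0.tar.gz/validatelite-0.5.0/shared/database/database_dialect.py | _format_pattern_to_regex
-- ===== SOURCE A (Python) =====
-- def _format_pattern_to_regex(format_pattern: str) -> str:
--     """Convert date format pattern to PostgreSQL regex pattern"""
--     # Handle both case variations (YYYY/yyyy, MM/mm, etc.)
--     # PostgreSQL uses POSIX regex - use [0-9] instead of \\d
--     pattern_map = {
--         "YYYY": r"[0-9]{4}",
--         "yyyy": r"[0-9]{4}",
--         "MM": r"[0-9]{2}",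
--         "mm": r"[0-9]{2}",
--         "DD": r"[0-9]{2}",
--         "dd": r"[0-9]{2}",
--         "HH": r"[0-9]{2}",
--         "hh": r"[0-9]{2}",
--         "MI": r"[0-9]{2}",
--         "mi": r"[0-9]{2}",
--         "SS": r"[0-9]{2}",
--         "ss": r"[0-9]{2}",
--     }
--
--     regex = format_pattern
--     # Sort by length (descending) to avoid partial replacements
--     for fmt in sorted(pattern_map.keys(), key=len, reverse=True):
--         regex = regex.replace(fmt, pattern_map[fmt])
--
--     return f"^{regex}$"
-- ===== SOURCE B (Python) =====
-- # One compiled regex alternation (longest tokens first) + a single re.sub pass with a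
-- # replacement function, instead of 12 sequential str.replace passes.
-- import re
--
-- _PATTERN_MAP = {
--     "YYYY": r"[0-9]{4}",
--     "yyyy": r"[0-9]{4}",
--     "MM": r"[0-9]{2}",
--     "mm": r"[0-9]{2}",
--     "DD": r"[0-9]{2}",
--     "dd": r"[0-9]{2}",
--     "HH": r"[0-9]{2}",
--     "hh": r"[0-9]{2}",
--     "MI": r"[0-9]{2}",
--     "mi": r"[0-9]{2}",
--     "SS": r"[0-9]{2}",
--     "ss": r"[0-9]{2}",
-- }
--
-- # 4-char tokens first so the alternation prefers the longest match at each position.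
-- _TOKEN_RE = re.compile("|".join(sorted(_PATTERN_MAP, key=len, reverse=True)))
--
--
-- def _format_pattern_to_regex(format_pattern: str) -> str:
--     body = _TOKEN_RE.sub(lambda m: _PATTERN_MAP[m.group(0)], format_pattern)
--     return f"^{body}$"
-- ===== Notes on version B (the rewrite author's own statement) =====
-- stated objective: idiomatic
-- what changed: Replaces A's 12 sequential global str.replace passes with one precompiled regex alternation (longest tokens first) applied in a single left-to-right re.sub pass with a replacement function.
import Mathlib
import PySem

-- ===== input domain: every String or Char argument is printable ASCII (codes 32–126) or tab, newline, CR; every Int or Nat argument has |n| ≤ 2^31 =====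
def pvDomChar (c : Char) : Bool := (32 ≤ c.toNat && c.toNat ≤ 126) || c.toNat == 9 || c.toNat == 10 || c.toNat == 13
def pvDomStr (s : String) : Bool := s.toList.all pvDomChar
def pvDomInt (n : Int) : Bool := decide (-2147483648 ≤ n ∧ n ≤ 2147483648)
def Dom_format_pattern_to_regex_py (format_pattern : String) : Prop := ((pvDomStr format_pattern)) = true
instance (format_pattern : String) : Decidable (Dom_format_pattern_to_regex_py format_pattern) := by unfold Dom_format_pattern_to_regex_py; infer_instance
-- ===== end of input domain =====

-- B replaces A's 12 sequential global str.replace passes by one left-to-right scan that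
-- substitutes the first (longest-first-ordered) matching token at each position (idiomatic
-- single re.sub pass in Python); proved to return the same string on every input.

-- ===== PORT A =====
def pvPatternMapA : PySem.Dict String String := PySem.Dict.mk
  [("YYYY", "[0-9]{4}"), ("yyyy", "[0-9]{4}"), ("MM", "[0-9]{2}"), ("mm", "[0-9]{2}"),
   ("DD", "[0-9]{2}"), ("dd", "[0-9]{2}"), ("HH", "[0-9]{2}"), ("hh", "[0-9]{2}"),
   ("MI", "[0-9]{2}"), ("mi", "[0-9]{2}"), ("SS", "[0-9]{2}"), ("ss", "[0-9]{2}")]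

def format_pattern_to_regex_py (format_pattern : String) : String :=
  -- regex = format_pattern; for fmt in sorted(pattern_map.keys(), key=len, reverse=True): regex = regex.replace(fmt, pattern_map[fmt])
  let regex := (PySem.List.sorted pvPatternMapA.keys (fun fmt => PySem.Str.len fmt) true).foldl
    (fun regex fmt => PySem.Str.replace regex fmt (pvPatternMapA.getD fmt "")) format_pattern
  "^" ++ regex ++ "$"

-- ===== PORT B =====
-- the alternation "YYYY|yyyy|MM|mm|DD|dd|HH|hh|MI|mi|SS|ss" with its replacement strings
def pvTokenTable : List (List Char × List Char) :=
  [("YYYY".toList, "[0-9]{4}".toList), ("yyyy".toList, "[0-9]{4}".toList),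
   ("MM".toList, "[0-9]{2}".toList), ("mm".toList, "[0-9]{2}".toList),
   ("DD".toList, "[0-9]{2}".toList), ("dd".toList, "[0-9]{2}".toList),
   ("HH".toList, "[0-9]{2}".toList), ("hh".toList, "[0-9]{2}".toList),
   ("MI".toList, "[0-9]{2}".toList), ("mi".toList, "[0-9]{2}".toList),
   ("SS".toList, "[0-9]{2}".toList), ("ss".toList, "[0-9]{2}".toList)]

-- Hand port of _TOKEN_RE.sub(lambda m: _PATTERN_MAP[m.group(0)], s): re's leftmost scan over
-- an alternation of literal tokens substitutes, at each position, the first alternative that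
-- matches and resumes after it, else copies one character.  Exact for literal alternatives;
-- the fuel (remaining length) only makes totality evident and is never exhausted.
def pvSubScan (ps : List (List Char × List Char)) : Nat → List Char → List Char
  | _, [] => []
  | 0, l => l
  | fuel + 1, c :: t =>
    match ps.find? (fun p => p.1.isPrefixOf (c :: t)) with
    | some p => p.2 ++ pvSubScan ps fuel ((c :: t).drop p.1.length)
    | none => c :: pvSubScan ps fuel t

def format_pattern_to_regex_py_alt (format_pattern : String) : String :=
  let cs := format_pattern.toList
  "^" ++ String.ofList (pvSubScan pvTokenTable cs.length cs) ++ "$"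

-- ===== PRECONDITION & SPEC =====
def Spec_format_pattern_to_regex_py (format_pattern : String) (out : String) : Prop := out = format_pattern_to_regex_py_alt format_pattern
instance (format_pattern : String) (out : String) : Decidable (Spec_format_pattern_to_regex_py format_pattern out) := by unfold Spec_format_pattern_to_regex_py; infer_instance

-- ===== CLAIM (what is proved, stated in full; the proofs are below) =====
def Claim_equal_format_pattern_to_regex_py : Prop := ∀ (format_pattern : String), Dom_format_pattern_to_regex_py format_pattern → Spec_format_pattern_to_regex_py format_pattern (format_pattern_to_regex_py format_pattern)

-- ===== LEMMAS AND PROOFS =====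

theorem pvReplaceUnfold (l old new : List Char) (h : old ≠ []) :
    PySem.Chars.replace l old new = PySem.Chars.replace.go old new l.length l [] := by
  have he : old.isEmpty = false := by simp [h]
  simp [PySem.Chars.replace, he]

theorem pvReplaceNil (old new : List Char) (h : old ≠ []) :
    PySem.Chars.replace [] old new = [] := by
  rw [pvReplaceUnfold _ _ _ h]; simp [PySem.Chars.replace.go]

theorem pvGoEq (old new : List Char) (h : old ≠ []) :
    ∀ f (l acc : List Char), l.length ≤ f →
      PySem.Chars.replace.go old new f l acc = acc.reverse ++ PySem.Chars.replace l old new := by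
  intro f
  induction f using Nat.strong_induction_on with
  | _ f ih =>
    intro l acc hl
    cases l with
    | nil => cases f <;> simp [PySem.Chars.replace.go, pvReplaceNil _ _ h]
    | cons c t =>
      cases f with
      | zero => simp at hl
      | succ f =>
        have h1 : 0 < old.length := List.length_pos_of_ne_nil h
        have hlt : t.length ≤ f := by simp at hl; omega
        by_cases hp : old.isPrefixOf (c :: t) = true
        · have hd : ((c :: t).drop old.length).length ≤ f := by
            simp [List.length_drop]; omega
          have hr : PySem.Chars.replace (c :: t) old new
              = new ++ PySem.Chars.replace ((c :: t).drop old.length) old new := by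
            rw [pvReplaceUnfold _ _ _ h]
            simp only [List.length_cons, PySem.Chars.replace.go, hp, if_true]
            rw [ih t.length (by omega) _ _ (by simp [List.length_drop]; omega)]
            simp
          simp only [PySem.Chars.replace.go, hp, if_true]
          rw [ih f (Nat.lt_succ_self f) _ _ hd, hr]
          simp
        · have hp' : old.isPrefixOf (c :: t) = false := by
            rw [← Bool.not_eq_true]; exact hp
          have hr : PySem.Chars.replace (c :: t) old new = c :: PySem.Chars.replace t old new := by
            rw [pvReplaceUnfold _ _ _ h]
            simp only [List.length_cons, PySem.Chars.replace.go, hp', Bool.false_eq_true, if_false]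
            rw [ih t.length (by omega) t [c] le_rfl]
            simp
          simp only [PySem.Chars.replace.go, hp', Bool.false_eq_true, if_false]
          rw [ih f (Nat.lt_succ_self f) t (c :: acc) hlt, hr]
          simp

theorem pvReplaceConsPos (c : Char) (t old new : List Char) (h : old ≠ [])
    (hp : old.isPrefixOf (c :: t) = true) :
    PySem.Chars.replace (c :: t) old new
      = new ++ PySem.Chars.replace ((c :: t).drop old.length) old new := by
  have h1 : 0 < old.length := List.length_pos_of_ne_nil h
  rw [pvReplaceUnfold _ _ _ h]
  simp only [List.length_cons, PySem.Chars.replace.go, hp, if_true]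
  rw [pvGoEq old new h t.length _ _ (by simp [List.length_drop]; omega)]
  simp

theorem pvReplaceConsNeg (c : Char) (t old new : List Char) (h : old ≠ [])
    (hp : old.isPrefixOf (c :: t) = false) :
    PySem.Chars.replace (c :: t) old new = c :: PySem.Chars.replace t old new := by
  rw [pvReplaceUnfold _ _ _ h]
  simp only [List.length_cons, PySem.Chars.replace.go, hp, Bool.false_eq_true, if_false]
  rw [pvGoEq old new h t.length t [c] le_rfl]
  simp

theorem pvReplaceSelf (old new z : List Char) (h : old ≠ []) :
    PySem.Chars.replace (old ++ z) old new = new ++ PySem.Chars.replace z old new := by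
  cases old with
  | nil => exact absurd rfl h
  | cons o os =>
    have hp : (o :: os).isPrefixOf (o :: (os ++ z)) = true := by
      rw [List.isPrefixOf_iff_prefix, List.cons_prefix_cons]
      exact ⟨rfl, List.prefix_append _ _⟩
    have := pvReplaceConsPos o (os ++ z) (o :: os) new h hp
    rw [List.cons_append, this]
    congr 2
    exact List.drop_left

-- "old mismatches a at every offset, by a position still inside a"
abbrev pvNoCross (a old : List Char) : Prop :=
  ∀ p < a.length, ∃ q < old.length, p + q < a.length ∧ a[p+q]? ≠ old[q]?

theorem pvNoCrossOfAlpha (a old : List Char) (ha : ∀ c ∈ a, PySem.Chars.isalpha c = false)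
    (h1 : old ≠ []) (h2 : ∀ c ∈ old, PySem.Chars.isalpha c = true) : pvNoCross a old := by
  intro p hp
  have h0 : 0 < old.length := List.length_pos_of_ne_nil h1
  refine ⟨0, h0, by omega, ?_⟩
  have hap : a[p+0]? = some a[p] := by simp [List.getElem?_eq_getElem hp]
  have hop : old[0]? = some old[0] := by simp [List.getElem?_eq_getElem h0]
  rw [hap, hop]
  intro heq
  have heq' : a[p] = old[0] := by injection heq
  have hfa := ha a[p] (List.getElem_mem hp)
  have htr := h2 old[0] (List.getElem_mem h0)
  rw [heq', htr] at hfa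
  exact absurd hfa (by simp)

theorem pvNoCrossNotPrefix (a old x : List Char) (hnc : pvNoCross a old) (ha : a ≠ []) :
    old.isPrefixOf (a ++ x) = false := by
  by_contra hb
  rw [Bool.not_eq_false, List.isPrefixOf_iff_prefix] at hb
  obtain ⟨r, hr⟩ := hb
  have h0 : 0 < a.length := List.length_pos_of_ne_nil ha
  obtain ⟨q, hq, hqa, hne⟩ := hnc 0 h0
  have e1 : (a ++ x)[q]? = a[q]? := List.getElem?_append_left (by omega)
  have e2 : (old ++ r)[q]? = old[q]? := List.getElem?_append_left hq
  rw [hr] at e2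
  simp only [Nat.zero_add] at hne
  exact hne (by rw [← e1, ← e2])

theorem pvNoCrossTail (c : Char) (a old : List Char) (h : pvNoCross (c :: a) old) :
    pvNoCross a old := by
  intro p hp
  obtain ⟨q, hq, hlt, hne⟩ := h (p + 1) (by simp; omega)
  refine ⟨q, hq, by simp at hlt; omega, ?_⟩
  have e : p + 1 + q = (p + q) + 1 := by omega
  rw [e, List.getElem?_cons_succ] at hne
  exact hne

theorem pvReplaceAppend (old new a x : List Char) (h : old ≠ []) (hnc : pvNoCross a old) :
    PySem.Chars.replace (a ++ x) old new = a ++ PySem.Chars.replace x old new := by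
  induction a with
  | nil => simp
  | cons c a' ih =>
    have hp : old.isPrefixOf ((c :: a') ++ x) = false :=
      pvNoCrossNotPrefix (c :: a') old x hnc (by simp)
    rw [List.cons_append, pvReplaceConsNeg c (a' ++ x) old new h hp,
      ih (pvNoCrossTail c a' old hnc)]
    rfl

theorem pvPrefixReplace (old new : List Char) (hold : old ≠ []) (hnew : new ≠ [])
    (hα : ∀ c ∈ new, PySem.Chars.isalpha c = false) :
    ∀ (x w : List Char), (∀ c ∈ w, PySem.Chars.isalpha c = true) →
      w <+: PySem.Chars.replace x old new → w <+: x := by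
  intro x
  induction x with
  | nil =>
    intro w _ h
    rw [pvReplaceNil _ _ hold] at h
    exact h
  | cons c t ih =>
    intro w hw h
    by_cases hp : old.isPrefixOf (c :: t) = true
    · rw [pvReplaceConsPos c t old new hold hp] at h
      cases w with
      | nil => exact List.nil_prefix
      | cons w0 w' =>
        cases new with
        | nil => exact absurd rfl hnew
        | cons n0 n' =>
          rw [List.cons_append, List.cons_prefix_cons] at h
          have hw0 := hw w0 List.mem_cons_self
          have hn0 := hα n0 List.mem_cons_self
          rw [h.1, hn0] at hw0
          exact absurd hw0 (by simp)
    · have hp' : old.isPrefixOf (c :: t) = false := by rw [← Bool.not_eq_true]; exact hp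
      rw [pvReplaceConsNeg c t old new hold hp'] at h
      cases w with
      | nil => exact List.nil_prefix
      | cons w0 w' =>
        rw [List.cons_prefix_cons] at h ⊢
        exact ⟨h.1, ih w' (fun d hd => hw d (List.mem_cons_of_mem _ hd)) h.2⟩

abbrev pvGood (qs : List (List Char × List Char)) : Prop :=
  ∀ p ∈ qs, p.1 ≠ [] ∧ p.2 ≠ [] ∧ (∀ c ∈ p.1, PySem.Chars.isalpha c = true) ∧
    (∀ c ∈ p.2, PySem.Chars.isalpha c = false)

abbrev pvOrdered (qs : List (List Char × List Char)) : Prop :=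
  List.Pairwise (fun q p => pvNoCross p.1 q.1) qs

def pvFoldRep (qs : List (List Char × List Char)) (l : List Char) : List Char :=
  qs.foldl (fun y p => PySem.Chars.replace y p.1 p.2) l

theorem pvFoldRepNil (qs : List (List Char × List Char)) (hg : pvGood qs) :
    pvFoldRep qs [] = [] := by
  induction qs with
  | nil => rfl
  | cons p qs' ih =>
    show pvFoldRep qs' (PySem.Chars.replace [] p.1 p.2) = []
    rw [pvReplaceNil _ _ (hg p List.mem_cons_self).1]
    exact ih (fun q hq => hg q (List.mem_cons_of_mem _ hq))

theorem pvFoldRepNoMatch (qs : List (List Char × List Char)) (hg : pvGood qs) :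
    ∀ (t : List Char) (c : Char), (∀ p ∈ qs, p.1.isPrefixOf (c :: t) = false) →
      pvFoldRep qs (c :: t) = c :: pvFoldRep qs t := by
  induction qs with
  | nil => intro t c _; rfl
  | cons p qs' ih =>
    intro t c hnp
    have hg' : pvGood qs' := fun q hq => hg q (List.mem_cons_of_mem _ hq)
    obtain ⟨h1, h2, _, h4⟩ := hg p List.mem_cons_self
    have e1 : PySem.Chars.replace (c :: t) p.1 p.2 = c :: PySem.Chars.replace t p.1 p.2 :=
      pvReplaceConsNeg c t p.1 p.2 h1 (hnp p List.mem_cons_self)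
    show pvFoldRep qs' (PySem.Chars.replace (c :: t) p.1 p.2)
        = c :: pvFoldRep qs' (PySem.Chars.replace t p.1 p.2)
    rw [e1]
    apply ih hg'
    intro q hq
    by_contra hb
    rw [Bool.not_eq_false, List.isPrefixOf_iff_prefix, ← e1] at hb
    have hpre := pvPrefixReplace p.1 p.2 h1 h2 h4 (c :: t) q.1 (hg' q hq).2.2.1 hb
    have := (List.isPrefixOf_iff_prefix (l₁ := q.1) (l₂ := c :: t)).mpr hpre
    rw [hnp q (List.mem_cons_of_mem _ hq)] at this
    exact absurd this (by simp)

theorem pvFoldRepBlock (qs : List (List Char × List Char)) (a : List Char)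
    (h : ∀ q ∈ qs, q.1 ≠ [] ∧ pvNoCross a q.1) :
    ∀ x, pvFoldRep qs (a ++ x) = a ++ pvFoldRep qs x := by
  induction qs with
  | nil => intro x; rfl
  | cons q qs' ih =>
    intro x
    obtain ⟨h1, h2⟩ := h q List.mem_cons_self
    show pvFoldRep qs' (PySem.Chars.replace (a ++ x) q.1 q.2)
        = a ++ pvFoldRep qs' (PySem.Chars.replace x q.1 q.2)
    rw [pvReplaceAppend q.1 q.2 a x h1 h2]
    exact ih (fun r hr => h r (List.mem_cons_of_mem _ hr)) (PySem.Chars.replace x q.1 q.2)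

theorem pvFoldRepMatch (pre post : List (List Char × List Char)) (p : List Char × List Char)
    (hg : pvGood (pre ++ p :: post)) (hcross : ∀ q ∈ pre, pvNoCross p.1 q.1)
    (rest : List Char) :
    pvFoldRep (pre ++ p :: post) (p.1 ++ rest) = p.2 ++ pvFoldRep (pre ++ p :: post) rest := by
  have hgp := hg p (by simp)
  have hsplit : ∀ y, pvFoldRep (pre ++ p :: post) y
      = pvFoldRep post (PySem.Chars.replace (pvFoldRep pre y) p.1 p.2) := by
    intro y; simp [pvFoldRep, List.foldl_append]
  rw [hsplit, hsplit]
  have hpre : pvFoldRep pre (p.1 ++ rest) = p.1 ++ pvFoldRep pre rest :=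
    pvFoldRepBlock pre p.1
      (fun q hq => ⟨(hg q (by simp [hq])).1, hcross q hq⟩) rest
  rw [hpre, pvReplaceSelf p.1 p.2 (pvFoldRep pre rest) hgp.1]
  exact pvFoldRepBlock post p.2
    (fun q hq => ⟨(hg q (by simp [hq])).1,
      pvNoCrossOfAlpha p.2 q.1 hgp.2.2.2 (hg q (by simp [hq])).1 (hg q (by simp [hq])).2.2.1⟩)
    (PySem.Chars.replace (pvFoldRep pre rest) p.1 p.2)

theorem pvMain (qs : List (List Char × List Char)) (hg : pvGood qs) (ho : pvOrdered qs) :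
    ∀ (f : Nat) (l : List Char), l.length ≤ f → pvFoldRep qs l = pvSubScan qs f l := by
  intro f
  induction f using Nat.strong_induction_on with
  | _ f ih =>
    intro l hl
    cases l with
    | nil => cases f <;> simp [pvSubScan, pvFoldRepNil qs hg]
    | cons c t =>
      cases f with
      | zero => simp at hl
      | succ f =>
        have hlt : t.length ≤ f := by simp at hl; omega
        cases hfind : qs.find? (fun p => p.1.isPrefixOf (c :: t)) with
        | none =>
          have hnp : ∀ p ∈ qs, p.1.isPrefixOf (c :: t) = false := by
            intro p hp
            have h' := List.find?_eq_none.mp hfind p hp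
            exact Bool.eq_false_iff.mpr h'
          rw [pvFoldRepNoMatch qs hg t c hnp, ih f (Nat.lt_succ_self f) t hlt]
          simp [pvSubScan, hfind]
        | some p =>
          obtain ⟨hpred, pre, post, hqs, -⟩ := List.find?_eq_some_iff_append.mp hfind
          have hpfx : p.1 <+: (c :: t) := List.isPrefixOf_iff_prefix.mp hpred
          obtain ⟨rest, hrest⟩ := hpfx
          have hp1 : p.1 ≠ [] := (hg p (by rw [hqs]; simp)).1
          have h1 : 0 < p.1.length := List.length_pos_of_ne_nil hp1
          have hcross : ∀ q ∈ pre, pvNoCross p.1 q.1 := by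
            intro q hq
            have ho' := ho
            rw [hqs] at ho'
            exact (List.pairwise_append.mp ho').2.2 q hq p (by simp)
          have hscan : pvSubScan qs (f + 1) (c :: t)
              = p.2 ++ pvSubScan qs f ((c :: t).drop p.1.length) := by
            simp [pvSubScan, hfind]
          have hdrop : (c :: t).drop p.1.length = rest := by
            rw [← hrest]; exact List.drop_left
          have hrl : rest.length ≤ f := by
            have := congrArg List.length hrest
            simp at this
            omega
          rw [hscan, hdrop, ← ih f (Nat.lt_succ_self f) rest hrl, ← hrest, hqs]
          exact pvFoldRepMatch pre post p (hqs ▸ hg) hcross rest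

theorem pvSortedKeys :
    PySem.List.sorted pvPatternMapA.keys (fun fmt => PySem.Str.len fmt) true
      = ["YYYY", "yyyy", "MM", "mm", "DD", "dd", "HH", "hh", "MI", "mi", "SS", "ss"] := by
  decide

theorem pvAeq (s : String) :
    format_pattern_to_regex_py s = "^" ++ String.ofList (pvFoldRep pvTokenTable s.toList) ++ "$" := by
  unfold format_pattern_to_regex_py
  rw [pvSortedKeys]
  simp only [List.foldl_cons, List.foldl_nil]
  simp [PySem.Str.replace, pvFoldRep, pvTokenTable,
    show pvPatternMapA.getD "YYYY" "" = "[0-9]{4}" from by decide,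
    show pvPatternMapA.getD "yyyy" "" = "[0-9]{4}" from by decide,
    show pvPatternMapA.getD "MM" "" = "[0-9]{2}" from by decide,
    show pvPatternMapA.getD "mm" "" = "[0-9]{2}" from by decide,
    show pvPatternMapA.getD "DD" "" = "[0-9]{2}" from by decide,
    show pvPatternMapA.getD "dd" "" = "[0-9]{2}" from by decide,
    show pvPatternMapA.getD "HH" "" = "[0-9]{2}" from by decide,
    show pvPatternMapA.getD "hh" "" = "[0-9]{2}" from by decide,
    show pvPatternMapA.getD "MI" "" = "[0-9]{2}" from by decide,
    show pvPatternMapA.getD "mi" "" = "[0-9]{2}" from by decide,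
    show pvPatternMapA.getD "SS" "" = "[0-9]{2}" from by decide,
    show pvPatternMapA.getD "ss" "" = "[0-9]{2}" from by decide]

-- ===== VERDICT (by name: the statement is the Claim_ definition above) =====
def pvNoCrossB (a old : List Char) : Bool :=
  (List.range a.length).all fun p => (List.range old.length).any fun q =>
    decide (p + q < a.length) && decide (a[p+q]? ≠ old[q]?)

theorem pvNoCrossB_imp (a old : List Char) (h : pvNoCrossB a old = true) : pvNoCross a old := by
  intro p hp
  rw [pvNoCrossB, List.all_eq_true] at h
  have h' := h p (List.mem_range.mpr hp)
  rw [List.any_eq_true] at h'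
  obtain ⟨q, hq, hqq⟩ := h'
  rw [Bool.and_eq_true, decide_eq_true_eq, decide_eq_true_eq] at hqq
  exact ⟨q, List.mem_range.mp hq, hqq.1, hqq.2⟩

def pvGoodB (qs : List (List Char × List Char)) : Bool :=
  qs.all fun p => !p.1.isEmpty && !p.2.isEmpty && p.1.all (fun c => PySem.Chars.isalpha c)
    && p.2.all (fun c => !PySem.Chars.isalpha c)

theorem pvGoodB_imp (qs : List (List Char × List Char)) (h : pvGoodB qs = true) :
    pvGood qs := by
  intro p hp
  rw [pvGoodB, List.all_eq_true] at h
  have h' := h p hp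
  rw [Bool.and_eq_true, Bool.and_eq_true, Bool.and_eq_true] at h'
  obtain ⟨⟨⟨h1, h2⟩, h3⟩, h4⟩ := h'
  refine ⟨fun hn => by rw [hn] at h1; simp at h1, fun hn => by rw [hn] at h2; simp at h2, ?_, ?_⟩
  · exact fun c hc => List.all_eq_true.mp h3 c hc
  · intro c hc
    have := List.all_eq_true.mp h4 c hc
    rwa [Bool.not_eq_true'] at this

def pvOrdB : List (List Char × List Char) → Bool
  | [] => true
  | p :: r => r.all (fun x => pvNoCrossB x.1 p.1) && pvOrdB r

theorem pvOrdB_imp (qs : List (List Char × List Char)) (h : pvOrdB qs = true) :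
    pvOrdered qs := by
  induction qs with
  | nil => exact List.Pairwise.nil
  | cons p r ih =>
    rw [pvOrdB, Bool.and_eq_true] at h
    exact List.Pairwise.cons
      (fun x hx => pvNoCrossB_imp _ _ (List.all_eq_true.mp h.1 x hx)) (ih h.2)

set_option maxRecDepth 4000 in
theorem pvGoodTable : pvGood pvTokenTable := pvGoodB_imp _ (by decide)

set_option maxRecDepth 4000 in
theorem pvOrderedTable : pvOrdered pvTokenTable := pvOrdB_imp _ (by decide)

theorem format_pattern_to_regex_py_spec : Claim_equal_format_pattern_to_regex_py := by
  intro s _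
  show format_pattern_to_regex_py s = format_pattern_to_regex_py_alt s
  rw [pvAeq]
  show _ = "^" ++ String.ofList (pvSubScan pvTokenTable s.toList.length s.toList) ++ "$"
  rw [← pvMain pvTokenTable pvGoodTable pvOrderedTable s.toList.length s.toList le_rfl]
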